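-- pv_equiv track=rewrite | github.com/daisyden/ai_for_validation | opencode/issue_triage/issue_analysis/generate_issue_report.py | generate_statistics_section
-- ===== SOURCE A (Python) =====
-- def get_category_display_name(cat: str) -> str:
--     """Map category codes/names to display names."""
--     category_map = {
--         '1 - Distributed': 'Distributed',
--         '2 - TorchAO': 'TorchAO',
--         '3 - PT2E': 'PT2E',
--         '4 - Flash Attention/Transformer': 'Flash Attention / Transformer Related',
--         '5 - Sparse': 'Sparse Operations Related',
--         '6 - Inductor/Compilation': 'Inductor / Compilation Related',
--         '7 - Torch Runtime': 'Others',
--         '8 - Torch Operations': 'Others',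
--         '9 - Dtype/Precision': 'Dtype / Precision Related',
--         '10 - Feature Not Supported': 'Others',
--         '11 - Skip/No Test Exists': 'Others',
--         '12 - Others': 'Others',
--         'Distributed': 'Distributed',
--         'TorchAO': 'TorchAO',
--         'PT2E': 'PT2E',
--         'Flash Attention / Transformer': 'Flash Attention / Transformer Related',
--         'Flash Attention/Transformer': 'Flash Attention / Transformer Related',
--         'Sparse': 'Sparse Operations Related',
--         'Inductor/Compilation': 'Inductor / Compilation Related',
--         'Dtype/Precision': 'Dtype / Precision Related',
--     }
--     return category_map.get(cat, cat)
--
-- def generate_statistics_section(issues: list) -> str: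
--     """Generate section 7: Statistics."""
--     lines = []
--     lines.append('## <span id=\'8-statistics\'>8. Statistics</span>\n')
--
--     # Action TBD counts
--     lines.append('### Action TBD Distribution\n')
--     action_counts = {}
--     for issue in issues:
--         action = issue.get('Action TBD', '') or 'Need Investigation'
--         action_counts[action] = action_counts.get(action, 0) + 1
--
--     lines.append('| Action TBD | Count |')
--     lines.append('|------------|------:|')
--     for action in sorted(action_counts.keys()):
--         lines.append(f'| {action} | {action_counts[action]} |')
--
--     # Category counts (using normalized display names)
--     lines.append('\n### Category Distribution\n')
--     cat_counts = {}
--     for issue in issues: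
--         raw_cat = issue.get('Category', 'unknown') or 'unknown'
--         cat = get_category_display_name(raw_cat)
--         cat_counts[cat] = cat_counts.get(cat, 0) + 1
--
--     lines.append('| Category | Count |')
--     lines.append('|----------|------:|')
--     for cat in sorted(cat_counts.keys()):
--         lines.append(f'| {cat} | {cat_counts[cat]} |')
--
--     # Test Module counts
--     lines.append('\n### Test Module Distribution\n')
--     module_counts = {}
--     for issue in issues:
--         module = issue.get('Test Module', 'unknown') or 'unknown'
--         module_counts[module] = module_counts.get(module, 0) + 1
--
--     lines.append('| Test Module | Count |')
--     lines.append('|-------------|------:|')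
--     for module in sorted(module_counts.keys()):
--         lines.append(f'| {module} | {module_counts[module]} |')
--
--     lines.append('')
--     return '\n'.join(lines)
-- ===== SOURCE B (Python) =====
-- def get_category_display_name(cat: str) -> str:
--     """Map category codes/names to display names."""
--     category_map = {
--         '1 - Distributed': 'Distributed',
--         '2 - TorchAO': 'TorchAO',
--         '3 - PT2E': 'PT2E',
--         '4 - Flash Attention/Transformer': 'Flash Attention / Transformer Related',
--         '5 - Sparse': 'Sparse Operations Related',
--         '6 - Inductor/Compilation': 'Inductor / Compilation Related',
--         '7 - Torch Runtime': 'Others',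
--         '8 - Torch Operations': 'Others',
--         '9 - Dtype/Precision': 'Dtype / Precision Related',
--         '10 - Feature Not Supported': 'Others',
--         '11 - Skip/No Test Exists': 'Others',
--         '12 - Others': 'Others',
--         'Distributed': 'Distributed',
--         'TorchAO': 'TorchAO',
--         'PT2E': 'PT2E',
--         'Flash Attention / Transformer': 'Flash Attention / Transformer Related',
--         'Flash Attention/Transformer': 'Flash Attention / Transformer Related',
--         'Sparse': 'Sparse Operations Related',
--         'Inductor/Compilation': 'Inductor / Compilation Related',
--         'Dtype/Precision': 'Dtype / Precision Related',
--     }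
--     return category_map.get(cat, cat)
--
--
-- def _table(title, header, sep, keys):
--     """One markdown count table: sort the multiset of keys once, then emit one
--     row per maximal run of equal keys (run length = that key's count)."""
--     s = sorted(keys)
--     rows = []
--     run = 0
--     for i in range(len(s)):
--         run += 1
--         if i + 1 == len(s) or s[i + 1] != s[i]:
--             rows.append('| %s | %d |' % (s[i], run))
--             run = 0
--     return [title, header, sep] + rows
--
--
-- def generate_statistics_section(issues: list) -> str:
--     """Generate section 7: Statistics (one pass over issues, then three
--     sort-and-run-length tables -- no counting dicts)."""
--     actions, cats, mods = [], [], []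
--     for issue in issues:
--         actions.append(issue.get('Action TBD', '') or 'Need Investigation')
--         cats.append(get_category_display_name(issue.get('Category', 'unknown') or 'unknown'))
--         mods.append(issue.get('Test Module', 'unknown') or 'unknown')
--     parts = (["## <span id='8-statistics'>8. Statistics</span>\n"]
--              + _table('### Action TBD Distribution\n', '| Action TBD | Count |', '|------------|------:|', actions)
--              + _table('\n### Category Distribution\n', '| Category | Count |', '|----------|------:|', cats)
--              + _table('\n### Test Module Distribution\n', '| Test Module | Count |', '|-------------|------:|', mods)
--              + [''])
--     return '\n'.join(parts)
-- ===== Notes on version B (the rewrite author's own statement) =====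
-- stated objective: alternative
-- what changed: B replaces A's three dict-counting loops by one pass collecting the three key lists and, per table, a sort of the whole multiset followed by a run-length scan: each row is a maximal run of equal keys in the sorted list, so counts come from run lengths instead of a counting dict.
import Mathlib
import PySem

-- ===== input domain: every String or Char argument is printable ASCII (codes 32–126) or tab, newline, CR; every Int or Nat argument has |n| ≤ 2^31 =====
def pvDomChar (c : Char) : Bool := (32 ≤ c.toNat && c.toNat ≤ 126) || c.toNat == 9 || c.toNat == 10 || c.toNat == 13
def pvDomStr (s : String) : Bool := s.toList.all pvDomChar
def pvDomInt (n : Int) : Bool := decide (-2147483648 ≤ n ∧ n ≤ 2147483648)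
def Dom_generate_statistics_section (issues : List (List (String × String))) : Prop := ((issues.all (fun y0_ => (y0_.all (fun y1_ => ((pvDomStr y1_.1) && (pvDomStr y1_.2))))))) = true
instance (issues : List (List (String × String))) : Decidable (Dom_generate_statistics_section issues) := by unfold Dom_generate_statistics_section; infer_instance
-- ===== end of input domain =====

-- B replaces A's three dict-counting loops by one pass collecting the three key lists
-- and, per table, a sort of the whole multiset followed by a run-length scan (each row
-- is a maximal run of equal keys) — objective: an alternative algorithm without dicts.

-- ===== PORT A =====
-- shared module helper (used verbatim by both Pythons)
def get_category_display_name (cat : String) : String :=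
  let category_map : PySem.Dict String String := PySem.Dict.ofList [
    ("1 - Distributed", "Distributed"),
    ("2 - TorchAO", "TorchAO"),
    ("3 - PT2E", "PT2E"),
    ("4 - Flash Attention/Transformer", "Flash Attention / Transformer Related"),
    ("5 - Sparse", "Sparse Operations Related"),
    ("6 - Inductor/Compilation", "Inductor / Compilation Related"),
    ("7 - Torch Runtime", "Others"),
    ("8 - Torch Operations", "Others"),
    ("9 - Dtype/Precision", "Dtype / Precision Related"),
    ("10 - Feature Not Supported", "Others"),
    ("11 - Skip/No Test Exists", "Others"),
    ("12 - Others", "Others"),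
    ("Distributed", "Distributed"),
    ("TorchAO", "TorchAO"),
    ("PT2E", "PT2E"),
    ("Flash Attention / Transformer", "Flash Attention / Transformer Related"),
    ("Flash Attention/Transformer", "Flash Attention / Transformer Related"),
    ("Sparse", "Sparse Operations Related"),
    ("Inductor/Compilation", "Inductor / Compilation Related"),
    ("Dtype/Precision", "Dtype / Precision Related")]
  category_map.getD cat cat

def generate_statistics_section (issues : List (List (String × String))) : String :=
  let lines : List String := []
  let lines := lines ++ ["## <span id='8-statistics'>8. Statistics</span>\n"]
  let lines := lines ++ ["### Action TBD Distribution\n"]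
  let action_counts : PySem.Dict String Int := issues.foldl (fun d issue =>
    let action := let a := (PySem.Dict.mk issue).getD "Action TBD" "";
                  if a = "" then "Need Investigation" else a
    d.insert action (d.getD action 0 + 1)) PySem.Dict.empty
  let lines := lines ++ ["| Action TBD | Count |"]
  let lines := lines ++ ["|------------|------:|"]
  let lines := lines ++ (PySem.List.sorted action_counts.keys (fun x => x) false).map
    (fun action => "| " ++ action ++ " | " ++ PySem.Int.toStr (action_counts.getD action 0) ++ " |")
  let lines := lines ++ ["\n### Category Distribution\n"]
  let cat_counts : PySem.Dict String Int := issues.foldl (fun d issue =>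
    let raw_cat := let c := (PySem.Dict.mk issue).getD "Category" "unknown";
                   if c = "" then "unknown" else c
    let cat := get_category_display_name raw_cat
    d.insert cat (d.getD cat 0 + 1)) PySem.Dict.empty
  let lines := lines ++ ["| Category | Count |"]
  let lines := lines ++ ["|----------|------:|"]
  let lines := lines ++ (PySem.List.sorted cat_counts.keys (fun x => x) false).map
    (fun cat => "| " ++ cat ++ " | " ++ PySem.Int.toStr (cat_counts.getD cat 0) ++ " |")
  let lines := lines ++ ["\n### Test Module Distribution\n"]
  let module_counts : PySem.Dict String Int := issues.foldl (fun d issue =>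
    let module := let m := (PySem.Dict.mk issue).getD "Test Module" "unknown";
                  if m = "" then "unknown" else m
    d.insert module (d.getD module 0 + 1)) PySem.Dict.empty
  let lines := lines ++ ["| Test Module | Count |"]
  let lines := lines ++ ["|-------------|------:|"]
  let lines := lines ++ (PySem.List.sorted module_counts.keys (fun x => x) false).map
    (fun module => "| " ++ module ++ " | " ++ PySem.Int.toStr (module_counts.getD module 0) ++ " |")
  let lines := lines ++ [""]
  PySem.Str.join "\n" lines

-- ===== PORT B =====
-- Source B's run-length scan over the sorted key list: `run` counts the current run,
-- a row is emitted when the next element differs (or the list ends).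
def pvRuns : List String → Int → List String
  | [], _ => []
  | [x], run => ["| " ++ x ++ " | " ++ PySem.Int.toStr (run + 1) ++ " |"]
  | x :: y :: rest, run =>
      if x ≠ y then ("| " ++ x ++ " | " ++ PySem.Int.toStr (run + 1) ++ " |") :: pvRuns (y :: rest) 0
      else pvRuns (y :: rest) (run + 1)

-- Source B's _table helper
def pvTable (title header sep : String) (keys : List String) : List String :=
  [title, header, sep] ++ pvRuns (PySem.List.sorted keys (fun x => x) false) 0

def generate_statistics_section_alt (issues : List (List (String × String))) : String :=
  let acc : List String × List String × List String := issues.foldl (fun acc issue =>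
    let d := PySem.Dict.mk issue
    let a := d.getD "Action TBD" ""
    let c := d.getD "Category" "unknown"
    let m := d.getD "Test Module" "unknown"
    (acc.1 ++ [if a = "" then "Need Investigation" else a],
     acc.2.1 ++ [get_category_display_name (if c = "" then "unknown" else c)],
     acc.2.2 ++ [if m = "" then "unknown" else m])) ([], [], [])
  PySem.Str.join "\n"
    (["## <span id='8-statistics'>8. Statistics</span>\n"]
      ++ pvTable "### Action TBD Distribution\n" "| Action TBD | Count |" "|------------|------:|" acc.1
      ++ pvTable "\n### Category Distribution\n" "| Category | Count |" "|----------|------:|" acc.2.1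
      ++ pvTable "\n### Test Module Distribution\n" "| Test Module | Count |" "|-------------|------:|" acc.2.2
      ++ [""])

-- ===== PRECONDITION & SPEC =====
def Spec_generate_statistics_section (issues : List (List (String × String))) (out : String) : Prop := out = generate_statistics_section_alt issues
instance (issues : List (List (String × String))) (out : String) : Decidable (Spec_generate_statistics_section issues out) := by unfold Spec_generate_statistics_section; infer_instance

-- ===== CLAIM (what is proved, stated in full; the proofs are below) =====
def Claim_equal_generate_statistics_section : Prop := ∀ (issues : List (List (String × String))), Dom_generate_statistics_section issues → Spec_generate_statistics_section issues (generate_statistics_section issues)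

-- ===== LEMMAS AND PROOFS =====

-- B's single pass over issues produces the three per-field key lists.
theorem pvFold_triple (issues : List (List (String × String)))
    (f g h : List (String × String) → String) (as bs cs : List String) :
    issues.foldl (fun (acc : List String × List String × List String) issue =>
      (acc.1 ++ [f issue], acc.2.1 ++ [g issue], acc.2.2 ++ [h issue])) (as, bs, cs)
      = (as ++ issues.map f, bs ++ issues.map g, cs ++ issues.map h) := by
  induction issues generalizing as bs cs with
  | nil => simp
  | cons x xs ih => simp [List.foldl_cons, ih]

-- A's counting loop keyed by f is the Counter of the mapped key list.
theorem pvFold_counter (issues : List (List (String × String)))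
    (f : List (String × String) → String) :
    issues.foldl (fun (d : PySem.Dict String Int) issue =>
      d.insert (f issue) (d.getD (f issue) 0 + 1)) PySem.Dict.empty
      = PySem.Dict.counter (issues.map f) := by
  rw [← PySem.Dict.foldl_insert_getD_add_one_eq_counter, List.foldl_map]

-- counts in a flatMap of replicates over a nodup key list
theorem pvCount_flatMap (t : List String) (n : String → Nat) (v : String) (hnd : t.Nodup) :
    (t.flatMap (fun k => List.replicate (n k) k)).count v = if v ∈ t then n v else 0 := by
  induction t with
  | nil => simp
  | cons k t ih =>
    rcases List.nodup_cons.mp hnd with ⟨hk, hnd'⟩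
    simp only [List.flatMap_cons, List.count_append, List.count_replicate, ih hnd', List.mem_cons]
    by_cases hv : v = k
    · subst hv; simp [hk]
    · simp [hv, Ne.symm hv]

-- a flatMap of replicates over a strictly increasing key list is ≤-sorted
theorem pvPairwise_flatMap (t : List String) (n : String → Nat)
    (hp : t.Pairwise (· < ·)) :
    (t.flatMap (fun k => List.replicate (n k) k)).Pairwise (· ≤ ·) := by
  induction t with
  | nil => simp
  | cons k t ih =>
    rcases List.pairwise_cons.mp hp with ⟨hk, hp'⟩
    simp only [List.flatMap_cons]
    rw [List.pairwise_append]
    refine ⟨?_, ?_, ?_⟩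
    · exact List.pairwise_replicate.mpr (Or.inr le_rfl)
    · exact ih hp'
    · intro a ha b hb
      rcases List.eq_of_mem_replicate ha with rfl
      rcases List.mem_flatMap.mp hb with ⟨k', hk', hb'⟩
      rcases List.eq_of_mem_replicate hb' with rfl
      exact le_of_lt (hk _ hk')

-- sorted(keys) decomposes into runs: one block of replicates per sorted distinct key
theorem pvSorted_eq_flatMap (keys : List String) :
    PySem.List.sorted keys (fun x => x) false
      = (PySem.List.sorted (PySem.Set.ofList keys) (fun x => x) false).flatMap
          (fun k => List.replicate (keys.count k) k) := by
  set t := PySem.List.sorted (PySem.Set.ofList keys) (fun x => x) false with ht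
  have hlt : t.Pairwise (· < ·) := PySem.List.sorted_ofList_pairwise_lt keys
  have hnd : t.Nodup := hlt.imp (fun h => ne_of_lt h)
  have hmem : ∀ v, v ∈ t ↔ v ∈ keys := by
    intro v
    rw [ht, PySem.List.mem_sorted, PySem.Set.mem_ofList]
  have hperm : (t.flatMap (fun k => List.replicate (keys.count k) k)).Perm keys := by
    rw [List.perm_iff_count]
    intro v
    rw [pvCount_flatMap t _ v hnd]
    by_cases hv : v ∈ keys
    · simp [(hmem v).mpr hv]
    · simp [List.count_eq_zero_of_not_mem hv]
  exact PySem.List.sorted_id_eq_of_perm_of_pairwise _ _ hperm (pvPairwise_flatMap t _ hlt)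

-- the scan over 'replicate (m+1) x ++ rest' emits one row for x and restarts
theorem pvRuns_replicate (m : Nat) (x : String) (rest : List String) (run : Int)
    (hrest : rest = [] ∨ ∃ y ys, rest = y :: ys ∧ x ≠ y) :
    pvRuns (List.replicate (m + 1) x ++ rest) run
      = ("| " ++ x ++ " | " ++ PySem.Int.toStr (run + (m : Int) + 1) ++ " |") :: pvRuns rest 0 := by
  induction m generalizing run with
  | zero =>
    rcases hrest with rfl | ⟨y, ys, rfl, hxy⟩
    · simp [pvRuns]
    · simp [pvRuns, hxy]
  | succ m ih =>
    have : List.replicate (m + 1 + 1) x ++ rest = x :: (List.replicate (m + 1) x ++ rest) := by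
      simp [List.replicate_succ]
    rw [this]
    have hcons : List.replicate (m + 1) x ++ rest = x :: (List.replicate m x ++ rest) := by
      simp [List.replicate_succ]
    rw [show (x :: (List.replicate (m + 1) x ++ rest)) = x :: x :: (List.replicate m x ++ rest) by rw [hcons]]
    show pvRuns (x :: x :: (List.replicate m x ++ rest)) run = _
    rw [pvRuns]
    simp only [ne_eq, not_true_eq_false, if_false]
    rw [← hcons, ih (run + 1)]
    have harith : run + 1 + (m : Int) + 1 = run + ((m + 1 : Nat) : Int) + 1 := by push_cast; ring
    rw [harith]

-- run-length rows over the flatMap of replicates = one row per distinct key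
theorem pvRuns_flatMap (t : List String) (n : String → Nat)
    (hp : t.Pairwise (· < ·)) (hpos : ∀ k ∈ t, 0 < n k) :
    pvRuns (t.flatMap (fun k => List.replicate (n k) k)) 0
      = t.map (fun k => "| " ++ k ++ " | " ++ PySem.Int.toStr ((n k : Int)) ++ " |") := by
  induction t with
  | nil => simp [pvRuns]
  | cons k t ih =>
    rcases List.pairwise_cons.mp hp with ⟨hk, hp'⟩
    have hposk := hpos k (List.mem_cons_self)
    obtain ⟨m, hm⟩ : ∃ m, n k = m + 1 := ⟨n k - 1, by omega⟩
    have hrest : t.flatMap (fun k => List.replicate (n k) k) = []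
        ∨ ∃ y ys, t.flatMap (fun k => List.replicate (n k) k) = y :: ys ∧ k ≠ y := by
      cases t with
      | nil => exact Or.inl rfl
      | cons k' t' =>
        right
        have hposk' := hpos k' (by simp)
        obtain ⟨m', hm'⟩ : ∃ m', n k' = m' + 1 := ⟨n k' - 1, by omega⟩
        refine ⟨k', List.replicate m' k' ++ t'.flatMap (fun k => List.replicate (n k) k), ?_, ?_⟩
        · simp [hm', List.replicate_succ]
        · exact ne_of_lt (hk k' (by simp))
    simp only [List.flatMap_cons, hm]
    rw [pvRuns_replicate m k _ 0 hrest, ih hp' (fun k hk => hpos k (List.mem_cons_of_mem _ hk))]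
    have harith : (0 : Int) + (m : Int) + 1 = ((n k : Nat) : Int) := by rw [hm]; push_cast; ring
    rw [harith, List.map_cons]

-- One table of A (rows over sorted distinct keys with dict counts) equals B's
-- run-length rows over the sorted key multiset.
theorem pvTable_eq (keys : List String) :
    (PySem.List.sorted (PySem.Dict.counter keys).keys (fun x => x) false).map
      (fun k => "| " ++ k ++ " | " ++ PySem.Int.toStr ((PySem.Dict.counter keys).getD k 0) ++ " |")
    = pvRuns (PySem.List.sorted keys (fun x => x) false) 0 := by
  rw [PySem.Dict.keys_counter, pvSorted_eq_flatMap keys,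
      pvRuns_flatMap _ _ (PySem.List.sorted_ofList_pairwise_lt keys)
        (by intro k hk
            rw [PySem.List.mem_sorted, PySem.Set.mem_ofList] at hk
            exact List.count_pos_iff.mpr hk)]
  apply List.map_congr_left
  intro k hk
  rw [PySem.Dict.getD_counter]

-- ===== VERDICT (by name: the statement is the Claim_ definition above) =====
theorem generate_statistics_section_spec : Claim_equal_generate_statistics_section := by
  intro issues _
  unfold Spec_generate_statistics_section generate_statistics_section generate_statistics_section_alt pvTable
  rw [pvFold_triple]
  simp only [List.nil_append]
  rw [pvFold_counter issues (fun issue =>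
        let a := (PySem.Dict.mk issue).getD "Action TBD" "";
        if a = "" then "Need Investigation" else a),
      pvFold_counter issues (fun issue =>
        get_category_display_name
          (let c := (PySem.Dict.mk issue).getD "Category" "unknown";
           if c = "" then "unknown" else c)),
      pvFold_counter issues (fun issue =>
        let m := (PySem.Dict.mk issue).getD "Test Module" "unknown";
        if m = "" then "unknown" else m),
      pvTable_eq, pvTable_eq, pvTable_eq]
  simp [List.append_assoc]
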